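-- pv_equiv track=rewrite | github.com/helmdubo/SCAFFOLD | dev/tools/CFTUV/analysis_boundary_loops.py | _loop_edge_span
-- ===== SOURCE A (Python) =====
-- def _loop_edge_span(loop_edge_indices, start_loop_index, end_loop_index):
--     edge_count = len(loop_edge_indices)
--     if edge_count == 0:
--         return []
--
--     start_loop_index %= edge_count
--     end_loop_index %= edge_count
--     if start_loop_index == end_loop_index:
--         return list(loop_edge_indices)
--
--     span = []
--     loop_index = start_loop_index
--     safety = 0
--     while safety < edge_count:
--         safety += 1
--         span.append(loop_edge_indices[loop_index])
--         loop_index = (loop_index + 1) % edge_count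
--         if loop_index == end_loop_index:
--             break
--     return span
-- ===== SOURCE B (Python) =====
-- def _loop_edge_span(loop_edge_indices, start_loop_index, end_loop_index):
--     n = len(loop_edge_indices)
--     if n == 0:
--         return []
--     s = start_loop_index % n
--     e = end_loop_index % n
--     if s == e:
--         return list(loop_edge_indices)
--     if s < e:
--         return list(loop_edge_indices[s:e])
--     return list(loop_edge_indices[s:]) + list(loop_edge_indices[:e])
-- ===== Notes on version B (the rewrite author's own statement) =====
-- stated objective: simpler
-- what changed: Replaces A's element-by-element modular stepping loop with a safety counter by one or two bulk slice copies (xs[s:e], or xs[s:]+xs[:e] on wrap-around).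
import Mathlib
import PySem

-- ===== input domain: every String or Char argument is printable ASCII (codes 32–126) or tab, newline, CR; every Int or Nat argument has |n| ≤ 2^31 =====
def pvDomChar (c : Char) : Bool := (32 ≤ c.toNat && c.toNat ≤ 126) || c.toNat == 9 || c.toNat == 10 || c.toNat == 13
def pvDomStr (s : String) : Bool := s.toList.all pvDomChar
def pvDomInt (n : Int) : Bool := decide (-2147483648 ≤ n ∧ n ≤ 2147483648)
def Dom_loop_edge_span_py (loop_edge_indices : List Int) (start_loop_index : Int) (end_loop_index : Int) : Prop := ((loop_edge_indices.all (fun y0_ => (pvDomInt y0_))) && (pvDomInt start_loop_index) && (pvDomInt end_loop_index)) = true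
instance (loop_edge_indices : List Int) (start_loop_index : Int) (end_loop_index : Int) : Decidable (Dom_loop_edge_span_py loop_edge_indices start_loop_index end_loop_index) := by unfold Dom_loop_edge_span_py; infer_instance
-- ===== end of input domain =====

-- B replaces A's element-by-element modular stepping loop (with safety counter) by one or
-- two bulk slice copies; objective: simpler.

-- ===== PORT A =====
-- the while loop: fuel = edge_count - safety (so it starts at edge_count)
def pvLoopA (xs : List Int) (n : Int) (e : Int) : Nat → Int → List Int → List Int
  | 0, _, span => span
  | fuel + 1, i, span =>
    let span' := span ++ [(PySem.List.pyGet? xs i).getD 0]   -- index is always in [0,n): pyGet? returns some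
    let i' := PySem.Int.mod (i + 1) n
    if i' = e then span' else pvLoopA xs n e fuel i' span'

def loop_edge_span_py (loop_edge_indices : List Int) (start_loop_index : Int) (end_loop_index : Int) : List Int :=
  let edge_count : Int := loop_edge_indices.length
  if loop_edge_indices.length = 0 then []
  else
    let s := PySem.Int.mod start_loop_index edge_count
    let e := PySem.Int.mod end_loop_index edge_count
    if s = e then loop_edge_indices
    else pvLoopA loop_edge_indices edge_count e loop_edge_indices.length s []

-- ===== PORT B =====
def loop_edge_span_py_alt (loop_edge_indices : List Int) (start_loop_index : Int) (end_loop_index : Int) : List Int :=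
  let n : Int := loop_edge_indices.length
  if loop_edge_indices.length = 0 then []
  else
    let s := PySem.Int.mod start_loop_index n
    let e := PySem.Int.mod end_loop_index n
    if s = e then loop_edge_indices
    else if s < e then PySem.List.slice loop_edge_indices (some s) (some e)
    else PySem.List.slice loop_edge_indices (some s) none ++ PySem.List.slice loop_edge_indices none (some e)

-- ===== PRECONDITION & SPEC =====
def Spec_loop_edge_span_py (loop_edge_indices : List Int) (start_loop_index : Int) (end_loop_index : Int) (out : List Int) : Prop := out = loop_edge_span_py_alt loop_edge_indices start_loop_index end_loop_index
instance (loop_edge_indices : List Int) (start_loop_index : Int) (end_loop_index : Int) (out : List Int) : Decidable (Spec_loop_edge_span_py loop_edge_indices start_loop_index end_loop_index out) := by unfold Spec_loop_edge_span_py; infer_instance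

-- ===== CLAIM (what is proved, stated in full; the proofs are below) =====
def Claim_equal_loop_edge_span_py : Prop := ∀ (loop_edge_indices : List Int) (start_loop_index : Int) (end_loop_index : Int), Dom_loop_edge_span_py loop_edge_indices start_loop_index end_loop_index → Spec_loop_edge_span_py loop_edge_indices start_loop_index end_loop_index (loop_edge_span_py loop_edge_indices start_loop_index end_loop_index)

-- ===== LEMMAS AND PROOFS =====

-- A's loop, started at index i with d steps remaining until e, emits the circular span
-- take d ((xs ++ xs).drop i).
theorem pvLoopA_eq_span (xs : List Int) (e : Nat) :
    ∀ (d i fuel : Nat) (span : List Int),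
      i < xs.length → e < xs.length → 1 ≤ d → d ≤ xs.length →
      (i + d = e ∨ i + d = e + xs.length) → d ≤ fuel →
      pvLoopA xs (xs.length : Int) (e : Int) fuel (i : Int) span
        = span ++ ((xs ++ xs).drop i).take d := by
  intro d
  induction d with
  | zero => intro i fuel span _ _ h1 _ _ _; omega
  | succ d ih =>
    intro i fuel span hi he _ hdn hie hfuel
    match fuel, hfuel with
    | fuel + 1, _ =>
      have hxi : (PySem.List.pyGet? xs (i : Int)).getD 0 = xs[i] := by
        simp [hi]
      have hii : (xs ++ xs).drop i = xs[i] :: (xs ++ xs).drop (i + 1) := by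
        rw [List.drop_eq_getElem_cons (by simp; omega)]
        congr 1
        exact List.getElem_append_left hi
      have hmod : PySem.Int.mod ((i : Int) + 1) (xs.length : Int)
          = (((i + 1) % xs.length : Nat) : Int) := by
        have : ((i : Int) + 1) = ((i + 1 : Nat) : Int) := by push_cast; ring
        rw [this, PySem.Int.mod_natCast]
      by_cases hwrap : i + 1 < xs.length
      · have hm : (i + 1) % xs.length = i + 1 := Nat.mod_eq_of_lt hwrap
        by_cases hde : d = 0
        · -- last step: i' = e, break
          have heq : i + 1 = e := by omega
          simp only [pvLoopA, hmod, hm, hde]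
          rw [if_pos (by exact_mod_cast heq)]
          rw [hii, hxi]; simp
        · -- continue with i' = i + 1
          have hne : ¬ (((i + 1 : Nat) : Int) = (e : Int)) := by
            intro h
            rw [Nat.cast_inj] at h
            omega
          simp only [pvLoopA, hmod, hm, if_neg hne]
          rw [ih (i + 1) fuel _ hwrap he (by omega) (by omega) (by omega) (by omega)]
          rw [hii, hxi]; simp
      · -- wrap: i + 1 = length, i' = 0
        have hlen : i + 1 = xs.length := by omega
        have hm : (i + 1) % xs.length = 0 := by rw [hlen, Nat.mod_self]
        have hdrop : ((xs ++ xs).drop (i + 1)).take d = xs.take d := by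
          rw [hlen, List.drop_left]
        by_cases hde : d = 0
        · -- last step: e = 0
          have he0 : e = 0 := by omega
          simp only [pvLoopA, hmod, hm, hde]
          rw [if_pos (by exact_mod_cast he0.symm)]
          rw [hii, hxi]; simp
        · have he0 : e ≠ 0 := by omega
          have hne : ¬ (((0 : Nat) : Int) = (e : Int)) := by
            intro h
            rw [Nat.cast_inj] at h
            omega
          simp only [pvLoopA, hmod, hm, if_neg hne]
          rw [ih 0 fuel _ (by omega) he (by omega) (by omega) (by omega) (by omega)]
          rw [hii, hxi]
          have h0d : ((xs ++ xs).drop 0).take d = xs.take d := by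
            simpa using List.take_append_of_le_length (l₂ := xs) (by omega)
          rw [h0d, ← hdrop]
          simp
-- ===== VERDICT (by name: the statement is the Claim_ definition above) =====
theorem loop_edge_span_py_spec : Claim_equal_loop_edge_span_py := by
  intro xs s e _
  unfold Spec_loop_edge_span_py loop_edge_span_py loop_edge_span_py_alt
  by_cases h0 : xs.length = 0
  · simp [h0]
  · simp only [h0, if_false]
    have hnpos : (0 : Int) < (xs.length : Int) := by exact_mod_cast Nat.pos_of_ne_zero h0
    set s' := PySem.Int.mod s (xs.length : Int) with hs'
    set e' := PySem.Int.mod e (xs.length : Int) with he'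
    have hs0 : 0 ≤ s' := PySem.Int.mod_nonneg s hnpos
    have he0 : 0 ≤ e' := PySem.Int.mod_nonneg e hnpos
    have hsl : s' < xs.length := PySem.Int.mod_lt s hnpos
    have hel : e' < xs.length := PySem.Int.mod_lt e hnpos
    by_cases hse : s' = e'
    · simp [hse]
    · simp only [if_neg hse]
      set sN := s'.toNat with hsN
      set eN := e'.toNat with heN
      have hsc : (sN : Int) = s' := Int.toNat_of_nonneg hs0
      have hec : (eN : Int) = e' := Int.toNat_of_nonneg he0
      have hsNl : sN < xs.length := by omega
      have heNl : eN < xs.length := by omega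
      have hneN : sN ≠ eN := by intro h; exact hse (by rw [← hsc, ← hec, h])
      have hdropapp : (xs ++ xs).drop sN = xs.drop sN ++ xs :=
        List.drop_append_of_le_length (by omega)
      by_cases hlt : s' < e'
      · have hltN : sN < eN := by omega
        rw [if_pos hlt, ← hsc, ← hec,
          pvLoopA_eq_span xs eN (eN - sN) sN xs.length [] hsNl heNl (by omega) (by omega)
            (Or.inl (by omega)) (by omega)]
        rw [PySem.List.slice_natCast, hdropapp,
          List.take_append_of_le_length (by simp; omega)]
        simp
      · have hgtN : eN < sN := by omega
        rw [if_neg hlt, ← hsc, ← hec,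
          pvLoopA_eq_span xs eN (xs.length - sN + eN) sN xs.length [] hsNl heNl (by omega)
            (by omega) (Or.inr (by omega)) (by omega)]
        rw [PySem.List.slice_from_natCast, PySem.List.slice_to_natCast, hdropapp,
          List.take_append, List.take_of_length_le (by simp)]
        have heq : xs.length - sN + eN - (xs.drop sN).length = eN := by simp
        rw [heq]
        simp
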